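-- pv_equiv track=rewrite | github.com/r00tk1d/experiments_master_mp_dilation | experiments/core/utils.py | remove_overlapping_chains
-- ===== SOURCE A (Python) =====
-- def remove_overlapping_chains(all_chain_set, m, d):
--     w = (m-1)*d + 1
--     all_non_overlapping_chain_set = []
--     non_overlapping_unanchored_chain = []
--     for i in range(len(all_chain_set)):
--         non_overlap = True
--         for j in range(1, len(all_chain_set[i])):
--             non_overlap = _check_non_overlap(all_chain_set[i][j-1], all_chain_set[i][j], w)
--             if not non_overlap:
--                 break
--         if non_overlap:
--             all_non_overlapping_chain_set.append(all_chain_set[i])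
--             non_overlapping_unanchored_chain = _set_best_chain(non_overlapping_unanchored_chain, all_chain_set[i])
--     return all_non_overlapping_chain_set, non_overlapping_unanchored_chain
--
-- def _check_non_overlap(seq_one, seq_two, w):
--     return seq_one + w < seq_two
--
-- def _set_best_chain(current_longest_chain, new_chain):
--     if len(new_chain) > len(current_longest_chain):
--         return new_chain
--     elif len(new_chain) == len(current_longest_chain) and new_chain[0] < current_longest_chain[0]:
--         return new_chain
--     return current_longest_chain
-- ===== SOURCE B (Python) =====
-- def remove_overlapping_chains(all_chain_set, m, d):
--     w = (m - 1) * d + 1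
--     filtered = []
--     for c in all_chain_set:
--         if len(c) < 2 or min(b - a for a, b in zip(c, c[1:])) > w:
--             filtered.append(c)
--     ranked = sorted((c for c in filtered if c), key=lambda c: (-len(c), c[0]))
--     best = ranked[0] if ranked else []
--     return filtered, best
-- ===== Notes on version B (the rewrite author's own statement) =====
-- stated objective: alternative
-- what changed: A chain is accepted when its minimum adjacent gap exceeds w (one min over the gaps instead of a per-pair break loop), and the best chain is picked by stably sorting the nonempty accepted chains by (-len, first) and taking the head, instead of A's incremental best-tracking fold.
import Mathlib
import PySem

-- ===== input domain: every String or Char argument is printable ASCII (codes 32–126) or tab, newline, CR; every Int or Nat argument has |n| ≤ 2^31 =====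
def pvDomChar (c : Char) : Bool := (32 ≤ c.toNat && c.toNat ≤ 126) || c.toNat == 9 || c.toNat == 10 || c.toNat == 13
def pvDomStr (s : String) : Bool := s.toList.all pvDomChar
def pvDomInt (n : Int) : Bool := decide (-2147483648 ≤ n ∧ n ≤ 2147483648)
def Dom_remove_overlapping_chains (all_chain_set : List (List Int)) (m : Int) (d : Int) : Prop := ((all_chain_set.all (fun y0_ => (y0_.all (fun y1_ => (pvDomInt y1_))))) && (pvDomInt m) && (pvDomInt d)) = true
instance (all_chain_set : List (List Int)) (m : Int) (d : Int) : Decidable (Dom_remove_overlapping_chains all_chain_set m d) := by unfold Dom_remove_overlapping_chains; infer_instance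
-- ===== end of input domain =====

-- B accepts a chain when its minimum adjacent gap exceeds w (instead of A's per-pair break
-- loop) and picks the best chain by stably sorting the nonempty accepted chains by
-- (-len, first) and taking the head (instead of A's incremental best-tracking fold);
-- objective: alternative.

-- ===== PORT A =====
def check_non_overlap (seq_one seq_two w : Int) : Bool := seq_one + w < seq_two

-- the inner 'for j in range(1, len(c)): non_overlap = _check_non_overlap(...); if not non_overlap: break'
-- as structural recursion over the adjacent pairs, with the break as returning false
def chain_loop (c : List Int) (w : Int) : Bool :=
  match c with
  | x :: y :: rest => if check_non_overlap x y w then chain_loop (y :: rest) w else false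
  | _ => true

-- new_chain[0] / current_longest_chain[0]: Python raises IndexError when both chains are
-- empty; that input is excluded by Pre_, the port returns the current chain there.
def set_best_chain (current_longest_chain new_chain : List Int) : List Int :=
  if new_chain.length > current_longest_chain.length then new_chain
  else if new_chain.length == current_longest_chain.length
          && decide (PySem.List.pyGetD new_chain 0 0 < PySem.List.pyGetD current_longest_chain 0 0) then new_chain
  else current_longest_chain

def remove_overlapping_chains (all_chain_set : List (List Int)) (m : Int) (d : Int) : List (List Int) × List Int :=
  let w := (m - 1) * d + 1
  (PySem.List.pyRange 0 (all_chain_set.length : Int) 1).foldl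
    (fun st i =>
      let c := PySem.List.pyGetD all_chain_set i []
      if chain_loop c w then (st.1 ++ [c], set_best_chain st.2 c) else st)
    ([], [])

-- ===== PORT B =====
-- 'len(c) < 2 or min(b - a for a, b in zip(c, c[1:])) > w'; the min is only taken when the
-- gap list is nonempty, so the none branch of min? is unreachable
def accept_chain (c : List Int) (w : Int) : Bool :=
  decide (c.length < 2)
  || (match PySem.List.min? ((c.zip c.tail).map (fun p => p.2 - p.1)) (fun x => x) with
      | some g => decide (w < g)
      | none => false)

def remove_overlapping_chains_alt (all_chain_set : List (List Int)) (m : Int) (d : Int) : List (List Int) × List Int :=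
  let w := (m - 1) * d + 1
  let filtered := all_chain_set.foldl (fun acc c => if accept_chain c w then acc ++ [c] else acc) []
  -- sorted(..., key=lambda c: (-len(c), c[0])) over the nonempty accepted chains; ranked[0] if ranked else []
  let ranked := PySem.List.sorted2 (filtered.filter (fun c => !c.isEmpty))
      (fun c => -(c.length : Int)) (fun c => PySem.List.pyGetD c 0 0)
  (filtered, ranked.head?.getD [])

-- ===== PRECONDITION & SPEC =====
-- Pre_ excludes exactly the inputs on which A raises IndexError: those where the first
-- non-overlapping chain of the list is empty (the best-chain update then indexes [0] of two
-- empty lists).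
def Pre_remove_overlapping_chains (all_chain_set : List (List Int)) (m : Int) (d : Int) : Prop :=
  (all_chain_set.filter (fun c => (c.zip c.tail).all (fun p => decide (p.1 + ((m - 1) * d + 1) < p.2)))).head? ≠ some []
instance (all_chain_set : List (List Int)) (m : Int) (d : Int) : Decidable (Pre_remove_overlapping_chains all_chain_set m d) := by unfold Pre_remove_overlapping_chains; infer_instance
def pvWitness_remove_overlapping_chains : List (List Int) × Int × Int := ([[0, 5], [3, 4], []], 2, 2)

def Spec_remove_overlapping_chains (all_chain_set : List (List Int)) (m : Int) (d : Int) (out : List (List Int) × List Int) : Prop := out = remove_overlapping_chains_alt all_chain_set m d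
instance (all_chain_set : List (List Int)) (m : Int) (d : Int) (out : List (List Int) × List Int) : Decidable (Spec_remove_overlapping_chains all_chain_set m d out) := by unfold Spec_remove_overlapping_chains; infer_instance

-- ===== CLAIM (what is proved, stated in full; the proofs are below) =====
def Claim_equal_remove_overlapping_chains : Prop := ∀ (all_chain_set : List (List Int)) (m : Int) (d : Int), Dom_remove_overlapping_chains all_chain_set m d → Pre_remove_overlapping_chains all_chain_set m d → Spec_remove_overlapping_chains all_chain_set m d (remove_overlapping_chains all_chain_set m d)

-- ===== LEMMAS AND PROOFS =====

-- A's inner break-loop tests exactly all adjacent pairs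
theorem chain_loop_eq_zip_all (c : List Int) (w : Int) :
    chain_loop c w = (c.zip c.tail).all (fun p => decide (p.1 + w < p.2)) := by
  match c with
  | [] => rfl
  | [x] => rfl
  | x :: y :: rest =>
    rw [chain_loop]
    have ih := chain_loop_eq_zip_all (y :: rest) w
    simp only [List.tail, List.zip, List.zipWith, List.all_cons, check_non_overlap] at *
    by_cases h : x + w < y <;> simp [h, ih]

-- 'every gap exceeds w' is 'the minimum gap exceeds w' (running min form)
theorem all_lt_iff_lt_foldl_min (w a : Int) (t : List Int) :
    ((a :: t).all (fun g => decide (w < g))) = decide (w < t.foldl min a) := by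
  have h1 := PySem.List.foldl_min_le t a
  have h2 := PySem.List.foldl_min_mem t a
  rw [Bool.eq_iff_iff]
  simp only [List.all_cons, List.all_eq_true, Bool.and_eq_true, decide_eq_true_eq]
  constructor
  · rintro ⟨ha, ht⟩
    rcases h2 with h | h
    · rw [h]; exact ha
    · exact ht _ h
  · intro h
    exact ⟨lt_of_lt_of_le h h1.1, fun y hy => lt_of_lt_of_le h (h1.2 y hy)⟩

-- per-pair change of variable: testing the gap list is testing the pairs
theorem all_gap (w : Int) (ps : List (Int × Int)) :
    (ps.map (fun p => p.2 - p.1)).all (fun g => decide (w < g))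
      = ps.all (fun p => decide (p.1 + w < p.2)) := by
  induction ps with
  | nil => rfl
  | cons p t ih =>
    simp only [List.map_cons, List.all_cons, ih]
    congr 1
    exact decide_eq_decide.mpr (by omega)

-- B's min-gap acceptance test equals A's all-pairs test
theorem accept_chain_eq_zip_all (c : List Int) (w : Int) :
    accept_chain c w = (c.zip c.tail).all (fun p => decide (p.1 + w < p.2)) := by
  match c with
  | [] => rfl
  | [x] => rfl
  | x :: y :: rest =>
    unfold accept_chain
    have h2 : decide ((x :: y :: rest).length < 2) = false := by simp
    rw [h2, Bool.false_or,
        show (((x :: y :: rest).zip (x :: y :: rest).tail).map (fun p => p.2 - p.1))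
          = (y - x) :: (((y :: rest).zip rest).map (fun p => p.2 - p.1)) from rfl,
        PySem.List.min?_id_cons]
    rw [show (match (some ((((y :: rest).zip rest).map (fun p => p.2 - p.1)).foldl min (y - x)) : Option Int) with
          | some g => decide (w < g) | none => false)
        = decide (w < (((y :: rest).zip rest).map (fun p => p.2 - p.1)).foldl min (y - x)) from rfl]
    rw [← all_lt_iff_lt_foldl_min,
        show ((y - x) :: (((y :: rest).zip rest).map (fun p => p.2 - p.1)))
          = (((x, y) :: ((y :: rest).zip rest)).map (fun p => p.2 - p.1)) from rfl,
        all_gap]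
    rfl

-- A's fused step splits into filtering and a separate fold over the filtered list
theorem foldl_split (p : List Int → Bool) (g : List Int → List Int → List Int)
    (L : List (List Int)) (fl : List (List Int)) (b : List Int) :
    L.foldl (fun st c => if p c then (st.1 ++ [c], g st.2 c) else st) (fl, b)
      = (fl ++ L.filter p, (L.filter p).foldl g b) := by
  induction L generalizing fl b with
  | nil => simp
  | cons c L ih =>
    by_cases h : p c <;> simp [h, ih]

-- the lexicographic 'before' predicate of B's sort key (-len, first)
def blt (a b : List Int) : Bool :=
  decide (-(a.length : Int) < -(b.length : Int))
  || (!decide (-(b.length : Int) < -(a.length : Int))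
      && decide (PySem.List.pyGetD a 0 0 < PySem.List.pyGetD b 0 0))

theorem sorted2_eq_foldl_insertBy_blt (xs : List (List Int)) :
    PySem.List.sorted2 xs (fun c => -(c.length : Int)) (fun c => PySem.List.pyGetD c 0 0)
      = xs.foldl (fun acc x => PySem.List.insertBy blt x acc) [] := rfl

-- head of one insertion step
theorem head?_insertBy (before : List Int → List Int → Bool) (x : List Int) (ys : List (List Int)) :
    (PySem.List.insertBy before x ys).head?
      = some (match ys.head? with | none => x | some y => if before x y then x else y) := by
  cases ys with
  | nil => rfl
  | cons y ys =>
    unfold PySem.List.insertBy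
    by_cases h : before x y <;> simp [h]

-- the running head of B's insertion-sort fold, as an Option-valued fold
def ostep (o : Option (List Int)) (c : List Int) : Option (List Int) :=
  some (match o with | none => c | some y => if blt c y then c else y)

theorem head?_sortfold (xs : List (List Int)) (acc : List (List Int)) :
    (xs.foldl (fun acc x => PySem.List.insertBy blt x acc) acc).head? = xs.foldl ostep acc.head? := by
  induction xs generalizing acc with
  | nil => rfl
  | cons x xs ih =>
    rw [List.foldl_cons, List.foldl_cons, ih, head?_insertBy]
    rfl

-- one step of the running head equals one step of A's best-tracking, on nonempty chains
theorem ostep_eq_set_best (cur c : List Int) (hcur : cur ≠ []) (hc : c ≠ []) :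
    ostep (some cur) c = some (set_best_chain cur c) := by
  obtain ⟨a, as, rfl⟩ := List.exists_cons_of_ne_nil hcur
  obtain ⟨x, xs, rfl⟩ := List.exists_cons_of_ne_nil hc
  simp only [ostep, blt, set_best_chain, PySem.List.pyGetD_zero_cons, gt_iff_lt, List.length_cons,
    beq_iff_eq, Bool.and_eq_true, Bool.or_eq_true, Bool.not_eq_true', decide_eq_true_eq,
    decide_eq_false_iff_not, neg_lt_neg_iff]
  split_ifs <;> first | rfl | (exfalso; push_cast at *; omega)

theorem set_best_ne_nil (cur c : List Int) (hcur : cur ≠ []) :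
    set_best_chain cur c ≠ [] := by
  have hl := List.length_pos_of_ne_nil hcur
  unfold set_best_chain
  split_ifs with h1 h2
  · intro h; subst h; simp only [List.length_nil, gt_iff_lt] at h1; omega
  · intro h; subst h
    simp only [Bool.and_eq_true, beq_iff_eq, List.length_nil] at h2
    obtain ⟨h2a, -⟩ := h2; omega
  · exact hcur

-- A's best-tracking fold over the remaining chains equals the running head of B's sort,
-- seeded with the current best
theorem best_fold (L : List (List Int)) (cur : List Int) (hcur : cur ≠ []) :
    L.foldl set_best_chain cur
      = ((L.filter (fun c => !c.isEmpty)).foldl ostep (some cur)).getD [] := by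
  induction L generalizing cur with
  | nil => simp
  | cons c L ih =>
    by_cases hc : c = []
    · subst hc
      have hl := List.length_pos_of_ne_nil hcur
      have hstep : set_best_chain cur [] = cur := by
        simp [set_best_chain, hl.ne]
      simp [hstep, ih cur hcur]
    · have hfil : (c :: L).filter (fun c => !c.isEmpty) = c :: L.filter (fun c => !c.isEmpty) := by
        simp [hc]
      rw [hfil, List.foldl_cons, List.foldl_cons, ostep_eq_set_best cur c hcur hc]
      exact ih (set_best_chain cur c) (set_best_ne_nil cur c hcur)

-- ===== VERDICT (by name: the statements are the Claim_ definitions above) =====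
theorem remove_overlapping_chains_spec : Claim_equal_remove_overlapping_chains := by
  intro chains m d _hdom hpre
  unfold Spec_remove_overlapping_chains
  simp only [remove_overlapping_chains, remove_overlapping_chains_alt]
  rw [PySem.List.foldl_pyRange_zero_pyGetD' chains ([] : List Int)
        (fun st c => if chain_loop c ((m - 1) * d + 1) then (st.1 ++ [c], set_best_chain st.2 c) else st)
        (([], []) : List (List Int) × List Int)]
  rw [foldl_split]
  have hok : (fun c => chain_loop c ((m - 1) * d + 1))
      = (fun c : List Int => (c.zip c.tail).all (fun p => decide (p.1 + ((m - 1) * d + 1) < p.2))) := by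
    funext c; exact chain_loop_eq_zip_all c ((m - 1) * d + 1)
  have hacc : (fun c => accept_chain c ((m - 1) * d + 1))
      = (fun c : List Int => (c.zip c.tail).all (fun p => decide (p.1 + ((m - 1) * d + 1) < p.2))) := by
    funext c; exact accept_chain_eq_zip_all c ((m - 1) * d + 1)
  rw [hok, PySem.List.foldl_append_if_eq_filter, hacc, List.nil_append,
      sorted2_eq_foldl_insertBy_blt, head?_sortfold]
  unfold Pre_remove_overlapping_chains at hpre
  rcases hF : chains.filter (fun c : List Int => (c.zip c.tail).all (fun p => decide (p.1 + ((m - 1) * d + 1) < p.2))) with _ | ⟨c, rest⟩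
  · rfl
  · have hc : c ≠ [] := by
      intro h; subst h; exact hpre (by rw [hF]; rfl)
    have hfirst : set_best_chain [] c = c := by
      unfold set_best_chain
      simp [List.length_pos_of_ne_nil hc]
    have hfil : (c :: rest).filter (fun c => !c.isEmpty) = c :: rest.filter (fun c => !c.isEmpty) := by
      simp [hc]
    rw [List.foldl_cons, hfirst, hfil, List.foldl_cons]
    have hcstep : ostep (List.head? ([] : List (List Int))) c = some c := rfl
    rw [hcstep]
    exact congrArg (fun b => (c :: rest, b)) (best_fold rest c hc)
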